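-- pv_equiv track=rewrite | github.com/kokati/python_game | 数独/列表的操作.py | hecheng
-- ===== SOURCE A (Python) =====
-- def put_0_end(list01):
--     list02=[]
--     list03=[]
--     list04=[]
--     for item in list01:
--         if item==0:
--             list02.append(item)
--         else:
--             list03.append(item)
--     list04 = list03 + list02
--     return list04
--
-- def hecheng(list01):
--     list01=put_0_end(list01)
--     for i in range(len(list01)-1):
--         if list01[i]==list01[i+1]:
--             list01[i]=2*list01[i+1]
--             list01[i+1]=0
--             i+=1
--     list02=put_0_end(list01)
--     return list02
-- ===== SOURCE B (Python) =====
-- def hecheng(list01):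
--     nums = [x for x in list01 if x != 0]
--     n = len(nums)
--     out = []
--     j = 0
--     while j < n:
--         if j + 1 < n and nums[j] == nums[j + 1]:
--             out.append(2 * nums[j])
--             j += 2
--         else:
--             out.append(nums[j])
--             j += 1
--     return out + [0] * (len(list01) - len(out))
-- ===== Notes on version B (the rewrite author's own statement) =====
-- stated objective: simpler
-- what changed: Replaces A's compact-zeros / in-place index-mutation merge loop / second compact-zeros pipeline by one filter plus a single consuming merge pass over the non-zero elements, padded with zeros.
import Mathlib
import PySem

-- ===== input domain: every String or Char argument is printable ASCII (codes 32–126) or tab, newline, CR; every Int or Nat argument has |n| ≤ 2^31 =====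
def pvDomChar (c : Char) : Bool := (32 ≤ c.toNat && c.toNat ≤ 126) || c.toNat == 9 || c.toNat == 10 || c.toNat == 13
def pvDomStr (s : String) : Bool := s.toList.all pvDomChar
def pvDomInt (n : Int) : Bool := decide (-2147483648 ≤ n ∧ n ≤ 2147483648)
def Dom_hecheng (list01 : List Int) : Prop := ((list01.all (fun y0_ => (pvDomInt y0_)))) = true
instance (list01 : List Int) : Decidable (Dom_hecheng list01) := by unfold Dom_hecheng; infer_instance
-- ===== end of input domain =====

-- B replaces A's compact/in-place-index-merge/compact pipeline by one filter plus a single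
-- consuming merge pass over the non-zero elements, padded with zeros (objective: simpler).

-- ===== PORT A =====
-- put_0_end: partition into zeros (list02) and non-zeros (list03), return list03 ++ list02
def putZeroEnd (list01 : List Int) : List Int :=
  let p := list01.foldl
    (fun (st : List Int × List Int) item =>
      if item = 0 then (st.1 ++ [item], st.2) else (st.1, st.2 ++ [item]))
    ([], [])
  p.2 ++ p.1

-- the in-place merge loop: for i in range(len-1): if l[i]==l[i+1]: l[i]=2*l[i+1]; l[i+1]=0
def hechengStep (acc : List Int) (i : Nat) : List Int :=
  if acc.getD i 0 = acc.getD (i + 1) 0 then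
    (acc.set i (2 * acc.getD (i + 1) 0)).set (i + 1) 0
  else acc

def hecheng (list01 : List Int) : List Int :=
  putZeroEnd
    ((List.range ((putZeroEnd list01).length - 1)).foldl hechengStep (putZeroEnd list01))

-- ===== PORT B =====
-- single index-pointer merge pass over the non-zero list (Source B's while loop; the out
-- accumulator's appends become the conses of this recursion)
def mergeFrom (nums : List Int) (j : Nat) : List Int :=
  if j < nums.length then
    if j + 1 < nums.length ∧ nums.getD j 0 = nums.getD (j + 1) 0 then
      2 * nums.getD j 0 :: mergeFrom nums (j + 2)
    else
      nums.getD j 0 :: mergeFrom nums (j + 1)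
  else []
termination_by nums.length - j

def hecheng_alt (list01 : List Int) : List Int :=
  mergeFrom (list01.filter (fun x => x ≠ 0)) 0 ++
    List.replicate (list01.length - (mergeFrom (list01.filter (fun x => x ≠ 0)) 0).length) 0

-- ===== PRECONDITION & SPEC =====
def Spec_hecheng (list01 : List Int) (out : List Int) : Prop := out = hecheng_alt list01
instance (list01 : List Int) (out : List Int) : Decidable (Spec_hecheng list01 out) := by unfold Spec_hecheng; infer_instance

-- ===== CLAIM (what is proved, stated in full; the proofs are below) =====
def Claim_equal_hecheng : Prop := ∀ (list01 : List Int), Dom_hecheng list01 → Spec_hecheng list01 (hecheng list01)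

-- ===== LEMMAS AND PROOFS =====

-- structural form of B's index-pointer pass
def mergePass : List Int → List Int
  | a :: b :: rest => if a = b then 2 * a :: mergePass rest else a :: mergePass (b :: rest)
  | [a] => [a]
  | [] => []

theorem mergeFrom_eq_mergePass (nums : List Int) (j : Nat) :
    mergeFrom nums j = mergePass (nums.drop j) := by
  induction j using mergeFrom.induct (nums := nums) with
  | case1 j h1 h2 ih =>
    rw [mergeFrom, if_pos h1, if_pos h2]
    obtain ⟨h1', heq⟩ := h2
    rw [List.drop_eq_getElem_cons h1, List.drop_eq_getElem_cons h1']
    rw [mergePass]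
    have ha : nums.getD j 0 = nums[j] := List.getD_eq_getElem _ _ h1
    have hb : nums.getD (j + 1) 0 = nums[j + 1] := List.getD_eq_getElem _ _ h1'
    rw [if_pos (by rw [← ha, ← hb]; exact heq)]
    rw [ih, ha]
  | case2 j h1 h2 ih =>
    rw [mergeFrom, if_pos h1, if_neg h2]
    have ha : nums.getD j 0 = nums[j] := List.getD_eq_getElem _ _ h1
    rw [List.drop_eq_getElem_cons h1, ih, ha]
    by_cases h1' : j + 1 < nums.length
    · rw [List.drop_eq_getElem_cons h1']
      rw [mergePass]
      have hb : nums.getD (j + 1) 0 = nums[j + 1] := List.getD_eq_getElem _ _ h1'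
      rw [if_neg (by rw [← ha, ← hb]; intro hc; exact h2 ⟨h1', hc⟩)]
    · have : nums.drop (j + 1) = [] := List.drop_eq_nil_of_le (by omega)
      rw [this]
      simp [mergePass]
  | case3 j h =>
    rw [mergeFrom, if_neg h]
    rw [List.drop_eq_nil_of_le (by omega), mergePass]

-- functional form of A's index loop
def loop2 : List Int → List Int
  | a :: b :: rest => if a = b then 2 * b :: loop2 (0 :: rest) else a :: loop2 (b :: rest)
  | [a] => [a]
  | [] => []
termination_by l => l.length

theorem putZeroEnd_foldl (l : List Int) (z nz : List Int) :
    l.foldl (fun (st : List Int × List Int) item =>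
      if item = 0 then (st.1 ++ [item], st.2) else (st.1, st.2 ++ [item])) (z, nz)
    = (z ++ List.replicate (l.count 0) 0, nz ++ l.filter (fun x => x ≠ 0)) := by
  induction l generalizing z nz with
  | nil => simp
  | cons a t ih =>
    by_cases h : a = 0
    · subst h
      simp [List.foldl_cons, ih, List.replicate_succ]
    · simp [List.foldl_cons, ih, h]

theorem putZeroEnd_eq (l : List Int) :
    putZeroEnd l = l.filter (fun x => x ≠ 0) ++ List.replicate (l.count 0) 0 := by
  simp [putZeroEnd, putZeroEnd_foldl l [] []]

theorem foldl_step_eq_loop2 (l pre : List Int) :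
    (List.range' pre.length (l.length - 1)).foldl hechengStep (pre ++ l)
      = pre ++ loop2 l := by
  induction l using loop2.induct generalizing pre with
  | case4 => simp [loop2]
  | case3 a => simp [loop2]
  | case1 b rest ih =>
    have hr : (b :: b :: rest).length - 1 = (0 :: rest).length - 1 + 1 := by simp
    rw [hr, List.range'_succ, List.foldl_cons]
    have hstep : hechengStep (pre ++ b :: b :: rest) pre.length
        = (pre ++ [2 * b]) ++ 0 :: rest := by
      unfold hechengStep
      have h1 : (pre ++ b :: b :: rest).getD pre.length 0 = b := by
        simp [List.getD]
      have h2 : (pre ++ b :: b :: rest).getD (pre.length + 1) 0 = b := by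
        simp [List.getD]
      rw [h1, h2, if_pos rfl]
      have hs1 : (pre ++ b :: b :: rest).set pre.length (2 * b)
          = pre ++ 2 * b :: b :: rest := by
        rw [List.set_append_right _ _ (le_refl pre.length)]
        simp
      rw [hs1]
      have hs2 : (pre ++ 2 * b :: b :: rest).set (pre.length + 1) 0
          = pre ++ 2 * b :: 0 :: rest := by
        rw [List.set_append_right _ _ (Nat.le_succ_of_le (le_refl pre.length))]
        simp [List.set]
      rw [hs2]; simp
    rw [hstep]
    have hlen : pre.length + 1 = (pre ++ [2 * b]).length := by simp
    rw [hlen, ih (pre ++ [2 * b])]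
    simp [loop2]
  | case2 a b rest h ih =>
    have hr : (a :: b :: rest).length - 1 = (b :: rest).length - 1 + 1 := by simp
    rw [hr, List.range'_succ, List.foldl_cons]
    have hstep : hechengStep (pre ++ a :: b :: rest) pre.length
        = (pre ++ [a]) ++ b :: rest := by
      unfold hechengStep
      have h1 : (pre ++ a :: b :: rest).getD pre.length 0 = a := by
        simp [List.getD]
      have h2 : (pre ++ a :: b :: rest).getD (pre.length + 1) 0 = b := by
        simp [List.getD]
      rw [h1, h2, if_neg h]; simp
    rw [hstep]
    have hlen : pre.length + 1 = (pre ++ [a]).length := by simp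
    rw [hlen, ih (pre ++ [a])]
    rw [loop2, if_neg h]
    simp

theorem loop2_zero_cons (l : List Int) : loop2 (0 :: l) = 0 :: loop2 l := by
  match l with
  | [] => simp [loop2]
  | c :: r =>
    by_cases h : c = 0
    · subst h; simp [loop2]
    · rw [loop2]; simp [Ne.symm h]

theorem loop2_replicate (k : Nat) : loop2 (List.replicate k 0) = List.replicate k 0 := by
  induction k with
  | zero => simp [loop2]
  | succ n ih => rw [List.replicate_succ, loop2_zero_cons, ih]

theorem loop2_length (l : List Int) : (loop2 l).length = l.length := by
  induction l using loop2.induct with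
  | case4 => simp [loop2]
  | case3 a => simp [loop2]
  | case1 b rest ih => rw [loop2, if_pos rfl]; simp at ih ⊢; omega
  | case2 a b rest h ih => rw [loop2, if_neg h]; simp at ih ⊢; omega

theorem filter_loop2 (ns : List Int) (k : Nat) (hns : ∀ x ∈ ns, x ≠ 0) :
    (loop2 (ns ++ List.replicate k 0)).filter (fun x => x ≠ 0) = mergePass ns := by
  induction ns using mergePass.induct with
  | case4 => simp [loop2_replicate, mergePass]
  | case3 a =>
    have ha : a ≠ 0 := hns a (by simp)
    match k with
    | 0 => simp [loop2, mergePass, ha]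
    | j + 1 =>
      rw [List.replicate_succ]
      simp only [List.cons_append, List.nil_append]
      rw [loop2, if_neg ha, loop2_zero_cons, loop2_replicate]
      simp [mergePass, ha]
  | case1 b rest ih =>
    have hb : b ≠ 0 := hns b (by simp)
    have h2b : (2 : Int) * b ≠ 0 := by
      intro hc; exact hb (by omega)
    simp only [List.cons_append]
    rw [loop2, if_pos rfl, loop2_zero_cons, mergePass, if_pos rfl]
    have ih' := ih (fun x hx => hns x (by simp [hx]))
    simp only [ne_eq, decide_not] at ih'
    simp [h2b, ih']
  | case2 a b rest h ih =>
    have ha : a ≠ 0 := hns a (by simp)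
    simp only [List.cons_append]
    rw [loop2, if_neg h, mergePass, if_neg h]
    have ih' := ih (fun x hx => hns x (by simp at hx ⊢; tauto))
    simp only [List.cons_append, ne_eq, decide_not] at ih'
    simp [ha, ih']

theorem mergePass_length_le (l : List Int) : (mergePass l).length ≤ l.length := by
  induction l using mergePass.induct with
  | case4 => simp [mergePass]
  | case3 a => simp [mergePass]
  | case1 b rest ih => rw [mergePass, if_pos rfl]; simp at ih ⊢; omega
  | case2 a b rest h ih => rw [mergePass, if_neg h]; simp at ih ⊢; omega

theorem count_zero_eq (l : List Int) :
    l.count 0 = l.length - (l.filter (fun x => x ≠ 0)).length := by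
  induction l with
  | nil => simp
  | cons a t ih =>
    have hle : (t.filter (fun x => !decide (x = 0))).length ≤ t.length :=
      List.length_filter_le _ _
    by_cases h : a = 0
    · subst h
      simp only [ne_eq, decide_not] at ih ⊢
      simp [ih]
      omega
    · simp only [ne_eq, decide_not] at ih ⊢
      simp [h, ih]

-- ===== VERDICT (by name: the statement is the Claim_ definition above) =====
theorem hecheng_spec : Claim_equal_hecheng := by
  intro list01 _
  unfold Spec_hecheng hecheng hecheng_alt
  rw [mergeFrom_eq_mergePass, List.drop_zero]
  have hfold := foldl_step_eq_loop2 (putZeroEnd list01) []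
  simp only [List.nil_append, List.length_nil] at hfold
  rw [List.range_eq_range', hfold]
  have hns : ∀ x ∈ list01.filter (fun x => x ≠ 0), x ≠ 0 := by
    intro x hx
    simpa using List.of_mem_filter hx
  rw [putZeroEnd_eq list01, putZeroEnd_eq, filter_loop2 _ _ hns]
  congr 1
  rw [count_zero_eq, filter_loop2 _ _ hns, loop2_length]
  have hle : (list01.filter (fun x => decide (x ≠ 0))).length ≤ list01.length :=
    List.length_filter_le _ _
  have hm : (mergePass (list01.filter (fun x => x ≠ 0))).length ≤
      (list01.filter (fun x => x ≠ 0)).length := mergePass_length_le _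
  have hk := count_zero_eq list01
  simp only [List.length_append, List.length_replicate]
  simp only [ne_eq, decide_not] at *
  rw [hk]
  congr 1
  omega
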